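-- pv_equiv track=rewrite | github.com/Tunesius/ProjectEuler | Problems/23.py | give_all_sums
-- ===== SOURCE A (Python) =====
-- def give_all_sums(abundant_numbers):
--     all_sum_set = set({})
--     for number in range(len(abundant_numbers)):
--         for number_two in range(number, len(abundant_numbers)):
--             temp_sum = abundant_numbers[number] + abundant_numbers[number_two]
--             if not temp_sum > 28123:
--                 all_sum_set.add(temp_sum)
--     return all_sum_set
-- ===== SOURCE B (Python) =====
-- def give_all_sums(abundant_numbers):
--     # Dedup first (order-preserving), then take pairwise sums over the
--     # distinct values only: O(n + d^2) instead of O(n^2) for d distinct values.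
--     vals = list(dict.fromkeys(abundant_numbers))
--     sums = set()
--     while vals:
--         x = vals[0]
--         for y in vals:
--             pair_sum = x + y
--             if pair_sum <= 28123:
--                 sums.add(pair_sum)
--         vals = vals[1:]
--     return sums
-- ===== Notes on version B (the rewrite author's own statement) =====
-- stated objective: alternative
-- what changed: B deduplicates the input first (dict.fromkeys) and forms the bounded pairwise sums by a suffix-shrinking while-loop over the distinct values only, so duplicate elements cost O(1) instead of a full quadratic row each.
import Mathlib
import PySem

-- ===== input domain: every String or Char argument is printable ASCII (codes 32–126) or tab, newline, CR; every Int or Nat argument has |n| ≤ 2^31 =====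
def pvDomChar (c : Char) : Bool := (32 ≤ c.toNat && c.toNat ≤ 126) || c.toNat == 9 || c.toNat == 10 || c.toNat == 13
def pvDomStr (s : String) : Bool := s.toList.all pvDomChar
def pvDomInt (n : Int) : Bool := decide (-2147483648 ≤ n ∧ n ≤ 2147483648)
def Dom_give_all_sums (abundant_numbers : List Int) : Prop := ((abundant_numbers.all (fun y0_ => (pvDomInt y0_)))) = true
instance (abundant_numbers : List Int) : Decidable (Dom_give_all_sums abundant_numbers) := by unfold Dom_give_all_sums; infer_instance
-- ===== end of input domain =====

-- B deduplicates the input first and forms the bounded pairwise sums over the distinct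
-- values only (objective: alternative — same result, duplicates no longer cost a quadratic row).

-- ===== PORT A =====
def give_all_sums (abundant_numbers : List Int) : List Int :=
  (PySem.List.pyRange 0 (abundant_numbers.length : Int)).foldl
    (fun all_sum_set number =>
      (PySem.List.pyRange number (abundant_numbers.length : Int)).foldl
        (fun all_sum_set number_two =>
          let temp_sum := PySem.List.pyGetD abundant_numbers number 0 +
                          PySem.List.pyGetD abundant_numbers number_two 0
          if ¬ temp_sum > 28123 then PySem.Set.add all_sum_set temp_sum else all_sum_set)
        all_sum_set)
    PySem.Set.empty

-- ===== PORT B =====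
-- the 'while vals: x = vals[0]; for y in vals: …; vals = vals[1:]' loop of Source B
def pvAltLoop (sums : PySem.Set Int) (vals : List Int) : PySem.Set Int :=
  match vals with
  | [] => sums
  | x :: rest =>
      pvAltLoop
        ((x :: rest).foldl
          (fun s y =>
            let pair_sum := x + y
            if pair_sum ≤ 28123 then PySem.Set.add s pair_sum else s)
          sums)
        rest

def give_all_sums_alt (abundant_numbers : List Int) : List Int :=
  pvAltLoop PySem.Set.empty (PySem.List.dedup abundant_numbers)

-- ===== PRECONDITION & SPEC =====
def Spec_give_all_sums (abundant_numbers : List Int) (out : List Int) : Prop := out = give_all_sums_alt abundant_numbers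
instance (abundant_numbers : List Int) (out : List Int) : Decidable (Spec_give_all_sums abundant_numbers out) := by unfold Spec_give_all_sums; infer_instance

-- ===== CLAIM (what is proved, stated in full; the proofs are below) =====
def Claim_equal_give_all_sums : Prop := ∀ (abundant_numbers : List Int), Dom_give_all_sums abundant_numbers → Spec_give_all_sums abundant_numbers (give_all_sums abundant_numbers)

-- ===== LEMMAS AND PROOFS =====

-- one filtered row of sums: [x + y for y in m if x + y <= 28123]
def pvRow (x : Int) (m : List Int) : List Int :=
  (m.map (fun y => x + y)).filter (fun s => decide (s ≤ 28123))

-- the whole upper triangle of bounded sums, row by row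
def pvTri : List Int → List Int
  | [] => []
  | x :: t => pvRow x (x :: t) ++ pvTri t

theorem pvMem_row {x : Int} {m : List Int} {s : Int} :
    s ∈ pvRow x m ↔ (∃ y ∈ m, s = x + y) ∧ s ≤ 28123 := by
  simp only [pvRow, List.mem_filter, List.mem_map, decide_eq_true_eq]
  constructor
  · rintro ⟨⟨y, hy, rfl⟩, h⟩; exact ⟨⟨y, hy, rfl⟩, h⟩
  · rintro ⟨⟨y, hy, rfl⟩, h⟩; exact ⟨⟨y, hy, rfl⟩, h⟩

theorem pvRow_cons (x a : Int) (r : List Int) :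
    pvRow x (a :: r) = (if x + a ≤ 28123 then [x + a] else []) ++ pvRow x r := by
  simp [pvRow]; split_ifs <;> simp_all

-- the inner 'for y' loop of B is an update with a row
theorem pvFold_row (x : Int) (m : List Int) (S : PySem.Set Int) :
    m.foldl (fun s y => let pair_sum := x + y;
      if pair_sum ≤ 28123 then PySem.Set.add s pair_sum else s) S
      = PySem.Set.update S (pvRow x m) := by
  induction m generalizing S with
  | nil => simp [pvRow, PySem.Set.update_nil]
  | cons a r ih =>
      rw [pvRow_cons, PySem.Set.update_append]
      simp only [List.foldl_cons]
      split_ifs with h <;> simp [ih, PySem.Set.update_cons, PySem.Set.update_nil]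

-- adding elements already present changes nothing
theorem pvUpdate_of_subset (q : List Int) (S : PySem.Set Int)
    (h : ∀ a ∈ q, a ∈ S) : PySem.Set.update S q = S := by
  induction q generalizing S with
  | nil => exact PySem.Set.update_nil S
  | cons a r ih =>
      rw [PySem.Set.update_cons, PySem.Set.add_of_mem (h a (by simp))]
      exact ih S (fun b hb => h b (by simp [hb]))

-- filtering out an element that is absorbed anyway changes nothing
theorem pvUpdate_filter (q : List Int) (S : PySem.Set Int) (c : Int)
    (h : c ∈ q → c ∈ S) :
    PySem.Set.update S (q.filter (fun y => y != c)) = PySem.Set.update S q := by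
  induction q generalizing S with
  | nil => rfl
  | cons a r ih =>
      by_cases hac : a = c
      · subst hac
        have haS : a ∈ S := h (by simp)
        simp only [List.filter_cons, bne_self_eq_false, Bool.false_eq_true, if_false,
          PySem.Set.update_cons, PySem.Set.add_of_mem haS]
        exact ih S (fun _ => haS)
      · simp only [List.filter_cons, bne_iff_ne, ne_eq, hac, not_false_eq_true, if_pos,
          PySem.Set.update_cons]
        exact ih (PySem.Set.add S a) (fun hc => (PySem.Set.mem_add S a c).2 (Or.inl (h (by simp [hc]))))

-- a row over a filtered partner list is the filtered row
theorem pvRow_filter (z x : Int) (m : List Int) :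
    pvRow z (m.filter (fun y => y != x)) = (pvRow z m).filter (fun s => s != z + x) := by
  induction m with
  | nil => rfl
  | cons a r ih =>
      by_cases hax : a = x
      · subst hax
        rw [pvRow_cons]
        simp only [List.filter_cons, bne_self_eq_false, Bool.false_eq_true, if_false,
          List.filter_append, ih]
        split_ifs with h <;> simp
      · have hne : z + a ≠ z + x := fun hh => hax (by omega)
        simp only [List.filter_cons, bne_iff_ne, ne_eq, hax, not_false_eq_true, if_pos]
        rw [pvRow_cons, pvRow_cons, List.filter_append, ih]
        split_ifs with h <;> simp [hne]

-- a row over deduplicated partners updates the same set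
theorem pvUpdate_row_dedup (z : Int) (m : List Int) (S : PySem.Set Int) :
    PySem.Set.update S (pvRow z (PySem.List.dedup m)) = PySem.Set.update S (pvRow z m) := by
  induction m generalizing S with
  | nil => rfl
  | cons a r ih =>
      have hd : PySem.List.dedup (a :: r)
          = a :: (PySem.List.dedup r).filter (fun y => y != a) := by
        simp [PySem.List.dedup_eq_ofList, PySem.Set.ofList_cons]; rfl
      rw [hd, pvRow_cons, pvRow_cons, PySem.Set.update_append, PySem.Set.update_append,
        pvRow_filter]
      set S₁ := PySem.Set.update S (if z + a ≤ 28123 then [z + a] else []) with hS₁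
      have habs : z + a ∈ pvRow z (PySem.List.dedup r) → z + a ∈ S₁ := by
        intro hmem
        have hle : z + a ≤ 28123 := (pvMem_row.1 hmem).2
        simp [hS₁, hle, PySem.Set.update_cons, PySem.Set.update_nil, PySem.Set.mem_add]
      rw [pvUpdate_filter _ _ _ habs, ih]

-- dropping from the triangle all partners equal to x changes nothing once
-- every bounded sum x + z (z in x :: m) is already present
theorem pvTri_filter (m : List Int) : ∀ (S : PySem.Set Int) (x : Int),
    (∀ z ∈ x :: m, x + z ≤ 28123 → (x + z) ∈ S) →
    PySem.Set.update S (pvTri (m.filter (fun y => y != x))) = PySem.Set.update S (pvTri m) := by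
  induction m with
  | nil => intro S x _; rfl
  | cons a r ih =>
      intro S x h
      by_cases hax : a = x
      · subst hax
        simp only [List.filter_cons, bne_self_eq_false, Bool.false_eq_true, if_false]
        have habs : PySem.Set.update S (pvRow a (a :: r)) = S := by
          apply pvUpdate_of_subset
          intro s hs
          obtain ⟨⟨y, hy, rfl⟩, hle⟩ := pvMem_row.1 hs
          exact h y (by simpa using hy) hle
        rw [show pvTri (a :: r) = pvRow a (a :: r) ++ pvTri r from rfl,
          PySem.Set.update_append, habs]
        refine ih S a (fun z hz => ?_)
        rcases List.mem_cons.1 hz with h1 | h2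
        · exact h z (by simp [h1])
        · exact h z (by simp [h2])
      · have hfc : (a :: r).filter (fun y => y != x) = a :: r.filter (fun y => y != x) := by
          simp [hax]
        rw [hfc, show pvTri (a :: r.filter (fun y => y != x))
            = pvRow a (a :: r.filter (fun y => y != x)) ++ pvTri (r.filter (fun y => y != x)) from rfl,
          show pvTri (a :: r) = pvRow a (a :: r) ++ pvTri r from rfl,
          PySem.Set.update_append, PySem.Set.update_append]
        have hrow : PySem.Set.update S (pvRow a (a :: r.filter (fun y => y != x)))
            = PySem.Set.update S (pvRow a (a :: r)) := by
          rw [pvRow_cons, pvRow_cons, PySem.Set.update_append, PySem.Set.update_append]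
          have : (r.filter (fun y => y != x)) = r.filter (fun y => y != x) := rfl
          rw [pvRow_filter]
          apply pvUpdate_filter
          intro hmem
          have hle : a + x ≤ 28123 := (pvMem_row.1 hmem).2
          have : (x + a) ∈ S := h a (by simp) (by omega)
          have hcomm : x + a = a + x := by ring
          rw [hcomm] at this
          exact (PySem.Set.mem_update _ _ _).2 (Or.inl this)
        rw [hrow]
        apply ih
        intro z hz hle
        rcases List.mem_cons.1 hz with h1 | h2
        · exact (PySem.Set.mem_update _ _ _).2 (Or.inl (h z (by simp [h1]) hle))
        · exact (PySem.Set.mem_update _ _ _).2 (Or.inl (h z (by simp [h2]) hle))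

-- main invariant: the triangle over the deduplicated list updates the same set
theorem pvTri_dedup (l : List Int) : ∀ (S : PySem.Set Int),
    PySem.Set.update S (pvTri (PySem.List.dedup l)) = PySem.Set.update S (pvTri l) := by
  induction l with
  | nil => intro S; rfl
  | cons x t ih =>
      intro S
      have hd : PySem.List.dedup (x :: t)
          = x :: (PySem.List.dedup t).filter (fun y => y != x) := by
        simp [PySem.List.dedup_eq_ofList, PySem.Set.ofList_cons]; rfl
      rw [hd, show pvTri (x :: (PySem.List.dedup t).filter (fun y => y != x))
          = pvRow x (x :: (PySem.List.dedup t).filter (fun y => y != x))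
            ++ pvTri ((PySem.List.dedup t).filter (fun y => y != x)) from rfl,
        show pvTri (x :: t) = pvRow x (x :: t) ++ pvTri t from rfl,
        PySem.Set.update_append, PySem.Set.update_append]
      have hrow : PySem.Set.update S (pvRow x (x :: (PySem.List.dedup t).filter (fun y => y != x)))
          = PySem.Set.update S (pvRow x (x :: t)) := by
        rw [pvRow_cons, pvRow_cons, PySem.Set.update_append, PySem.Set.update_append,
          pvRow_filter]
        have habs : x + x ∈ pvRow x (PySem.List.dedup t) →
            x + x ∈ PySem.Set.update S (if x + x ≤ 28123 then [x + x] else []) := by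
          intro hmem
          have hle : x + x ≤ 28123 := (pvMem_row.1 hmem).2
          simp [hle, PySem.Set.update_cons, PySem.Set.update_nil, PySem.Set.mem_add]
        rw [pvUpdate_filter _ _ _ habs, pvUpdate_row_dedup]
      rw [hrow]
      set S₁ := PySem.Set.update S (pvRow x (x :: t)) with hS₁
      have hK : PySem.Set.update S₁ (pvTri ((PySem.List.dedup t).filter (fun y => y != x)))
          = PySem.Set.update S₁ (pvTri (PySem.List.dedup t)) := by
        apply pvTri_filter
        intro z hz hle
        have hzt : z ∈ x :: t := by
          rcases List.mem_cons.1 hz with h1 | h2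
          · simp [h1]
          · exact List.mem_cons.2 (Or.inr ((PySem.List.mem_dedup _ _).1 h2))
        apply (PySem.Set.mem_update _ _ _).2
        exact Or.inr (pvMem_row.2 ⟨⟨z, hzt, rfl⟩, hle⟩)
      rw [hK, ih]

-- bridge for A's inner index loop
theorem pvInnerA (l : List Int) (X : Int) : ∀ (k i : Nat), i + k = l.length →
    ∀ (S : PySem.Set Int),
    (PySem.List.pyRange (i : Int) (l.length : Int)).foldl
      (fun s j =>
        let t := X + PySem.List.pyGetD l j 0
        if ¬ t > 28123 then PySem.Set.add s t else s) S
    = PySem.Set.update S (pvRow X (l.drop i)) := by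
  intro k
  induction k with
  | zero =>
      intro i hi S
      have hr : PySem.List.pyRange (i : Int) (l.length : Int) = [] := by
        simp [PySem.List.pyRange]; omega
      rw [hr]
      simp [List.drop_eq_nil_of_le (by omega : l.length ≤ i), pvRow, PySem.Set.update_nil]
  | succ k ih =>
      intro i hi S
      have hlt : (i : Int) < (l.length : Int) := by exact_mod_cast (by omega : i < l.length)
      rw [PySem.List.pyRange_one_cons hlt]
      have hil : i < l.length := by omega
      have hdrop : l.drop i = l[i] :: l.drop (i + 1) := (List.drop_eq_getElem_cons hil).symm ▸ rfl
      rw [hdrop, pvRow_cons, PySem.Set.update_append]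
      have hget : PySem.List.pyGetD l (i : Int) 0 = l[i] := by
        rw [PySem.List.pyGetD_natCast, List.getD_eq_getElem?_getD, List.getElem?_eq_getElem hil]
        rfl
      simp only [List.foldl_cons, hget]
      have hcast : ((i : Int) + 1) = ((i + 1 : Nat) : Int) := by push_cast; ring
      by_cases hc : X + l[i] ≤ 28123
      · rw [if_pos (by omega), hcast, ih (i+1) (by omega)]
        rw [if_pos hc, PySem.Set.update_cons, PySem.Set.update_nil]
      · rw [if_neg (by omega), hcast, ih (i+1) (by omega)]
        rw [if_neg hc, PySem.Set.update_nil]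

-- bridge for A's outer index loop
theorem pvOuterA (l : List Int) : ∀ (k i : Nat), i + k = l.length →
    ∀ (S : PySem.Set Int),
    (PySem.List.pyRange (i : Int) (l.length : Int)).foldl
      (fun all_sum_set number =>
        (PySem.List.pyRange number (l.length : Int)).foldl
          (fun s number_two =>
            let t := PySem.List.pyGetD l number 0 + PySem.List.pyGetD l number_two 0
            if ¬ t > 28123 then PySem.Set.add s t else s) all_sum_set) S
    = PySem.Set.update S (pvTri (l.drop i)) := by
  intro k
  induction k with
  | zero =>
      intro i hi S
      have hr : PySem.List.pyRange (i : Int) (l.length : Int) = [] := by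
        simp [PySem.List.pyRange]; omega
      rw [hr]
      simp [List.drop_eq_nil_of_le (by omega : l.length ≤ i), pvTri, PySem.Set.update_nil]
  | succ k ih =>
      intro i hi S
      have hil : i < l.length := by omega
      have hlt : (i : Int) < (l.length : Int) := by exact_mod_cast hil
      rw [PySem.List.pyRange_one_cons hlt]
      simp only [List.foldl_cons]
      rw [pvInnerA l (PySem.List.pyGetD l (i : Int) 0) (l.length - i) i (by omega) S]
      have hcast : ((i : Int) + 1) = ((i + 1 : Nat) : Int) := by push_cast; ring
      rw [hcast, ih (i+1) (by omega)]
      have hget : PySem.List.pyGetD l (i : Int) 0 = l[i] := by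
        rw [PySem.List.pyGetD_natCast, List.getD_eq_getElem?_getD, List.getElem?_eq_getElem hil]
        rfl
      have hdrop : l.drop i = l[i] :: l.drop (i + 1) := (List.drop_eq_getElem_cons hil).symm ▸ rfl
      rw [hget, hdrop, show pvTri (l[i] :: l.drop (i+1))
          = pvRow l[i] (l[i] :: l.drop (i+1)) ++ pvTri (l.drop (i+1)) from rfl,
        PySem.Set.update_append]

theorem pvA_eq_tri (l : List Int) : give_all_sums l = PySem.Set.update PySem.Set.empty (pvTri l) := by
  unfold give_all_sums
  have := pvOuterA l l.length 0 (by omega) PySem.Set.empty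
  simpa using this

theorem pvAltLoop_eq (vals : List Int) : ∀ (S : PySem.Set Int),
    pvAltLoop S vals = PySem.Set.update S (pvTri vals) := by
  induction vals with
  | nil => intro S; rfl
  | cons x rest ih =>
      intro S
      rw [pvAltLoop, pvFold_row, ih, ← PySem.Set.update_append]
      rfl

-- ===== VERDICT (by name: the statement is the Claim_ definition above) =====
theorem give_all_sums_spec : Claim_equal_give_all_sums := by
  intro l _
  unfold Spec_give_all_sums give_all_sums_alt
  rw [pvA_eq_tri, pvAltLoop_eq, pvTri_dedup]
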